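-- pv_equiv track=rewrite | github.com/ShishirModi/Skaitch | prompt_builder.py | _trim_prompt_to_budget
-- ===== SOURCE A (Python) =====
-- _SDXL_TOKEN_LIMIT = 75  # leave 2-token margin for BOS/EOS
--
-- def _estimate_token_count(text: str) -> int:
--     """Rough CLIP token estimate: ~0.75 tokens per word, commas as separators."""
--     words = text.replace(",", " ").split()
--     return max(1, int(len(words) * 0.75))
--
-- def _trim_prompt_to_budget(prompt: str, budget: int = _SDXL_TOKEN_LIMIT) -> str:
--     """Trim prompt from the END (lowest-priority tokens) to fit within budget.
--
--     §1.3 fix: Quality boosters are now prepended before extra_details so they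
--     are not the first to be truncated. This function trims only if the prompt
--     exceeds the budget, removing trailing comma-separated phrases.
--     """
--     if _estimate_token_count(prompt) <= budget:
--         return prompt
--     # Split on comma-separated phrases and rebuild until budget is reached
--     parts = [p.strip() for p in prompt.split(",") if p.strip()]
--     trimmed = []
--     running_count = 0
--     for part in parts:
--         part_tokens = _estimate_token_count(part)
--         if running_count + part_tokens > budget:
--             break
--         trimmed.append(part)
--         running_count += part_tokens
--     return ", ".join(trimmed)
-- ===== SOURCE B (Python) =====
-- _SDXL_TOKEN_LIMIT = 75  # leave 2-token margin for BOS/EOS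
--
-- def _estimate_token_count(text: str) -> int:
--     words = text.replace(",", " ").split()
--     return max(1, int(len(words) * 0.75))
--
-- def _trim_prompt_to_budget(prompt: str, budget: int = _SDXL_TOKEN_LIMIT) -> str:
--     # Shrink from the end: start with all parts, pop trailing parts while over budget.
--     # Correct because every per-part estimate is >= 1, so prefix sums increase and the
--     # longest prefix fitting the budget is exactly A's stop-at-first-overflow prefix.
--     if _estimate_token_count(prompt) <= budget:
--         return prompt
--     parts = [p.strip() for p in prompt.split(",") if p.strip()]
--     counts = [_estimate_token_count(p) for p in parts]
--     total = sum(counts)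
--     while parts and total > budget:
--         total -= counts.pop()
--         parts.pop()
--     return ", ".join(parts)
-- ===== Notes on version B (the rewrite author's own statement) =====
-- stated objective: alternative
-- what changed: B shrinks from the end: it sums all per-part estimates up front and pops trailing parts while the total exceeds the budget, instead of A's grow-from-front accumulate-and-break loop; equivalent because every per-part estimate is >= 1, so prefix sums are strictly increasing.
import Mathlib
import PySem

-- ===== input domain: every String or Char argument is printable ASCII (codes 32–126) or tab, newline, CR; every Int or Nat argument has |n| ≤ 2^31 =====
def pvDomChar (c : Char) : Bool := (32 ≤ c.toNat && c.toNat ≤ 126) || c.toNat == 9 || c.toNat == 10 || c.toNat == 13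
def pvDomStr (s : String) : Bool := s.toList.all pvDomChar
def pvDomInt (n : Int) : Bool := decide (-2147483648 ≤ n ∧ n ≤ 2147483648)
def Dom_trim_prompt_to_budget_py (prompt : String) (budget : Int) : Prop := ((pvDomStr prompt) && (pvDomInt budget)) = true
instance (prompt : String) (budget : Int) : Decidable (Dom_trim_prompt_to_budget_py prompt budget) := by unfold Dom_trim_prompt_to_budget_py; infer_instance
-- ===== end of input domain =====

-- B shrinks from the END (pops trailing parts while the total exceeds the budget) instead of
-- A's grow-from-front accumulate-and-break; equivalent since per-part estimates are ≥ 1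
-- (objective: alternative, same cost).

-- ===== PORT A =====
-- _estimate_token_count: words = text.replace(",", " ").split(); max(1, int(len(words)*0.75))
-- (int(n*0.75) = 3n/4 truncated; exact since the word count is a nonnegative machine int here)
def pvEstTok (text : String) : Int :=
  max 1 (((PySem.Str.split₀ (PySem.Str.replace text "," " ")).length * 3) / 4)

-- prompt.split(","): sep is the non-empty literal ",", so split? is always some; getD is exact
def pvParts (prompt : String) : List String :=
  (((PySem.Str.split? prompt ",").getD []).map (fun p => PySem.Str.strip p)).filter (fun p => p ≠ "")

-- the for-loop with break, as structural recursion over parts with (trimmed, running_count)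
def pvTrimLoop (budget : Int) : List String → List String → Int → List String
  | [], trimmed, _ => trimmed
  | p :: ps, trimmed, rc =>
      let t := pvEstTok p
      if rc + t > budget then trimmed
      else pvTrimLoop budget ps (trimmed ++ [p]) (rc + t)

def trim_prompt_to_budget_py (prompt : String) (budget : Int) : String :=
  if pvEstTok prompt ≤ budget then prompt
  else
    let parts := pvParts prompt
    PySem.Str.join ", " (pvTrimLoop budget parts [] 0)

-- ===== PORT B =====
-- the while-loop: while parts and total > budget: total -= counts.pop(); parts.pop()
def pvShrink (budget : Int) (parts : List String) (counts : List Int) (total : Int) : List String :=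
  if h : parts ≠ [] ∧ total > budget then
    pvShrink budget parts.dropLast counts.dropLast (total - counts.getLastD 0)
  else parts
termination_by parts.length
decreasing_by
  simp only [List.length_dropLast]
  exact Nat.sub_lt (List.length_pos_of_ne_nil h.1) Nat.one_pos

def trim_prompt_to_budget_py_alt (prompt : String) (budget : Int) : String :=
  if pvEstTok prompt ≤ budget then prompt
  else
    let parts := pvParts prompt
    let counts := parts.map pvEstTok
    PySem.Str.join ", " (pvShrink budget parts counts counts.sum)

-- ===== PRECONDITION & SPEC =====
def Spec_trim_prompt_to_budget_py (prompt : String) (budget : Int) (out : String) : Prop := out = trim_prompt_to_budget_py_alt prompt budget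
instance (prompt : String) (budget : Int) (out : String) : Decidable (Spec_trim_prompt_to_budget_py prompt budget out) := by unfold Spec_trim_prompt_to_budget_py; infer_instance

-- ===== CLAIM (what is proved, stated in full; the proofs are below) =====
def Claim_equal_trim_prompt_to_budget_py : Prop := ∀ (prompt : String) (budget : Int), Dom_trim_prompt_to_budget_py prompt budget → Spec_trim_prompt_to_budget_py prompt budget (trim_prompt_to_budget_py prompt budget)

-- ===== LEMMAS AND PROOFS =====
-- proof-only helpers: prefix sums of the counts and the first index exceeding budget
def pvTotals (t : Int) : List Int → List Int
  | [] => []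
  | c :: cs => (t + c) :: pvTotals (t + c) cs

def pvFirstOver (budget : Int) : List Int → Nat
  | [] => 0
  | s :: ss => if s > budget then 0 else pvFirstOver budget ss + 1

theorem pvEstTok_ge_one (p : String) : 1 ≤ pvEstTok p := le_max_left _ _

theorem pvTrimLoop_eq_take (budget : Int) (parts : List String) :
    ∀ (acc : List String) (rc : Int),
      pvTrimLoop budget parts acc rc
        = acc ++ parts.take (pvFirstOver budget (pvTotals rc (parts.map pvEstTok))) := by
  induction parts with
  | nil => intro acc rc; simp [pvTrimLoop, pvTotals, pvFirstOver]
  | cons p ps ih =>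
      intro acc rc
      simp only [pvTrimLoop, List.map, pvTotals, pvFirstOver]
      by_cases h : rc + pvEstTok p > budget
      · simp [h]
      · simp [h, ih]

theorem pvTotals_le (budget : Int) (cs : List Int) (hpos : ∀ c ∈ cs, 0 ≤ c) :
    ∀ t, t + cs.sum ≤ budget → ∀ x ∈ pvTotals t cs, x ≤ budget := by
  induction cs with
  | nil => simp [pvTotals]
  | cons c cs ih =>
      intro t hle x hx
      have hpos' : ∀ d ∈ cs, 0 ≤ d := fun d hd => hpos d (List.mem_cons_of_mem _ hd)
      have hsum : 0 ≤ cs.sum := List.sum_nonneg hpos'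
      simp only [List.sum_cons] at hle
      simp only [pvTotals, List.mem_cons] at hx
      rcases hx with rfl | hx
      · omega
      · exact ih hpos' (t + c) (by omega) x hx

theorem pvFirstOver_all_le (budget : Int) (xs : List Int)
    (h : ∀ x ∈ xs, x ≤ budget) : pvFirstOver budget xs = xs.length := by
  induction xs with
  | nil => simp [pvFirstOver]
  | cons x xs ih =>
      have hx : ¬ x > budget := by have := h x (List.mem_cons_self); omega
      simp [pvFirstOver, hx, ih (fun y hy => h y (List.mem_cons_of_mem _ hy))]

theorem pvFirstOver_le_length (budget : Int) (xs : List Int) :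
    pvFirstOver budget xs ≤ xs.length := by
  induction xs with
  | nil => simp [pvFirstOver]
  | cons x xs ih => simp only [pvFirstOver, List.length_cons]; split <;> omega

theorem pvTotals_length (t : Int) (cs : List Int) :
    (pvTotals t cs).length = cs.length := by
  induction cs generalizing t with
  | nil => simp [pvTotals]
  | cons c cs ih => simp [pvTotals, ih]

theorem pvTotals_concat (t c : Int) (cs : List Int) :
    pvTotals t (cs ++ [c]) = pvTotals t cs ++ [t + cs.sum + c] := by
  induction cs generalizing t with
  | nil => simp [pvTotals]
  | cons d cs ih =>
      simp only [List.cons_append, pvTotals, List.sum_cons, ih]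
      rw [show t + d + cs.sum + c = t + (d + cs.sum) + c by ring]

theorem pvFirstOver_concat_gt (budget e : Int) (xs : List Int) (he : e > budget) :
    pvFirstOver budget (xs ++ [e]) = pvFirstOver budget xs := by
  induction xs with
  | nil => simp [pvFirstOver, he]
  | cons x xs ih => simp only [List.cons_append, pvFirstOver, ih]

theorem pvShrink_eq_take (budget : Int) (parts : List String) :
    pvShrink budget parts (parts.map pvEstTok) ((parts.map pvEstTok).sum)
      = parts.take (pvFirstOver budget (pvTotals 0 (parts.map pvEstTok))) := by
  induction parts using List.reverseRecOn with
  | nil => rw [pvShrink]; simp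
  | append_singleton ps p ih =>
      rw [pvShrink]
      have hmap : (ps ++ [p]).map pvEstTok = ps.map pvEstTok ++ [pvEstTok p] := by simp
      by_cases hb : ((ps ++ [p]).map pvEstTok).sum > budget
      · have hne : ps ++ [p] ≠ [] := by simp
        rw [dif_pos ⟨hne, hb⟩, List.dropLast_concat, hmap, List.dropLast_concat,
          List.getLastD_concat]
        have hsum : (ps.map pvEstTok ++ [pvEstTok p]).sum - pvEstTok p
            = (ps.map pvEstTok).sum := by simp
        rw [hsum, ih, pvTotals_concat]
        have hlast : 0 + (ps.map pvEstTok).sum + pvEstTok p > budget := by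
          rw [hmap] at hb; simp only [List.sum_append, List.sum_cons, List.sum_nil] at hb; omega
        rw [pvFirstOver_concat_gt _ _ _ hlast]
        have hk : pvFirstOver budget (pvTotals 0 (ps.map pvEstTok)) ≤ ps.length := by
          have h1 := pvFirstOver_le_length budget (pvTotals 0 (ps.map pvEstTok))
          rw [pvTotals_length, List.length_map] at h1
          exact h1
        rw [List.take_append_of_le_length hk]
      · have hb' : (ps.map pvEstTok).sum + pvEstTok p ≤ budget := by
          rw [hmap] at hb
          simp only [List.sum_append, List.sum_cons, List.sum_nil] at hb
          omega
        rw [dif_neg (by simp; omega)]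
        have hall : ∀ x ∈ pvTotals 0 ((ps ++ [p]).map pvEstTok), x ≤ budget := by
          apply pvTotals_le
          · intro c hc
            simp only [List.mem_map] at hc
            obtain ⟨q, _, rfl⟩ := hc
            have := pvEstTok_ge_one q; omega
          · simp only [hmap, List.sum_append, List.sum_cons, List.sum_nil]
            omega
        rw [pvFirstOver_all_le _ _ hall, pvTotals_length, List.length_map, List.take_length]

-- ===== VERDICT (by name: the statement is the Claim_ definition above) =====
theorem trim_prompt_to_budget_py_spec : Claim_equal_trim_prompt_to_budget_py := by
  intro prompt budget _
  unfold Spec_trim_prompt_to_budget_py trim_prompt_to_budget_py trim_prompt_to_budget_py_alt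
  by_cases h : pvEstTok prompt ≤ budget
  · simp [h]
  · simp only [h, if_false]
    rw [pvTrimLoop_eq_take, pvShrink_eq_take]
    simp
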